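-- pv_equiv track=rewrite | github.com/william-lundgren/LoLQuiz | bot.py | find_leaderboard_top
-- ===== SOURCE A (Python) =====
-- def find_leaderboard_top(player_scores, n):
--     top_n = []
--     for key in player_scores.keys():
--         broken = False
--         if len(top_n) == 0:
--             top_n.append(key)
--         else:
--             for i, ele in enumerate(top_n):
--                 if player_scores.get(key) > player_scores.get(ele):
--                     top_n.insert(i, key)
--                     broken = True
--                     break
--             if not broken:
--                 top_n.append(key)
--
--     string = ""
--
--     for i, ele in enumerate(top_n[:n]):
--         if i == 0:
--             string += f":first_place: - {ele} - {player_scores.get(ele)} pts\n"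
--         elif i == 1:
--             string += f":second_place: - {ele} - {player_scores.get(ele)} pts\n"
--         elif i == 2:
--             string += f":third_place: - {ele} - {player_scores.get(ele)} pts\n"
--         else:
--             string += f"{i + 1} - {ele} - {player_scores.get(ele)} pts\n"
--     return string
-- ===== SOURCE B (Python) =====
-- def find_leaderboard_top(player_scores, n):
--     medals = [":first_place:", ":second_place:", ":third_place:"]
--     ranked = sorted(player_scores, key=player_scores.get, reverse=True)[:n]
--     lines = []
--     for i, name in enumerate(ranked):
--         label = medals[i] if i < 3 else str(i + 1)
--         lines.append(f"{label} - {name} - {player_scores[name]} pts\n")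
--     return "".join(lines)
-- ===== Notes on version B (the rewrite author's own statement) =====
-- stated objective: faster
-- what changed: Replaces the quadratic hand-rolled insertion into a sorted list with a single stable sorted(..., reverse=True) call, slices the top n, and builds the output by joining a list of formatted lines (medal label picked from a table) instead of repeated string +=.
import Mathlib
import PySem

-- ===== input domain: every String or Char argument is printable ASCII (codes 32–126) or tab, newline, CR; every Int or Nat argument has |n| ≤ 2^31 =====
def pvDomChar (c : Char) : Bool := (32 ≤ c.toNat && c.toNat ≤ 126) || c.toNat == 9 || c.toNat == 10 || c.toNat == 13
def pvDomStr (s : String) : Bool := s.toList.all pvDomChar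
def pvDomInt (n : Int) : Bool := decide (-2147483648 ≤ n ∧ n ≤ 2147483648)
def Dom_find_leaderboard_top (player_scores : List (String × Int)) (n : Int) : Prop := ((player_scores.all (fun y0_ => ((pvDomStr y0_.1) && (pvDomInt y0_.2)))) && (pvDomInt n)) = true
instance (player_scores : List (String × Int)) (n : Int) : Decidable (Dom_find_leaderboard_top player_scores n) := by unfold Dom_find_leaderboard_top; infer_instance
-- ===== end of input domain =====

-- B replaces A's quadratic insertion into a hand-maintained sorted list by one stable
-- reverse sort plus a slice, and joins a list of formatted lines instead of string +=.

-- dict.get (first-match lookup on the association list; keys looked up are always present)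
def pvGet (ps : List (String × Int)) (k : String) : Int :=
  ((ps.find? (fun p => p.1 == k)).map Prod.snd).getD 0

-- ===== PORT A =====
-- inner 'for i, ele in enumerate(top_n): … insert/break …; if not broken: append'
def pvInsertA (ps : List (String × Int)) (k : String) : List String → List String
  | [] => [k]
  | e :: rest => if pvGet ps k > pvGet ps e then k :: e :: rest else e :: pvInsertA ps k rest

def pvLineA (ps : List (String × Int)) (i : Int) (e : String) : String :=
  if i = 0 then ":first_place: - " ++ e ++ " - " ++ PySem.Int.toStr (pvGet ps e) ++ " pts\n"
  else if i = 1 then ":second_place: - " ++ e ++ " - " ++ PySem.Int.toStr (pvGet ps e) ++ " pts\n"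
  else if i = 2 then ":third_place: - " ++ e ++ " - " ++ PySem.Int.toStr (pvGet ps e) ++ " pts\n"
  else PySem.Int.toStr (i + 1) ++ " - " ++ e ++ " - " ++ PySem.Int.toStr (pvGet ps e) ++ " pts\n"

-- 'for i, ele in enumerate(top_n[:n]): string += …'
def pvFmtA (ps : List (String × Int)) : List String → Int → String → String
  | [], _, s => s
  | e :: rest, i, s => pvFmtA ps rest (i + 1) (s ++ pvLineA ps i e)

def find_leaderboard_top (player_scores : List (String × Int)) (n : Int) : String :=
  pvFmtA player_scores
    (PySem.List.slice
      (player_scores.foldl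
        (fun acc p => if acc.isEmpty then acc ++ [p.1] else pvInsertA player_scores p.1 acc) [])
      none (some n)) 0 ""

-- ===== PORT B =====
def pvMedals : List String := [":first_place:", ":second_place:", ":third_place:"]

def pvLineB (ps : List (String × Int)) (i : Int) (name : String) : String :=
  (if i < 3 then pvMedals.getD i.toNat "" else PySem.Int.toStr (i + 1)) ++ " - " ++ name
    ++ " - " ++ PySem.Int.toStr (pvGet ps name) ++ " pts\n"

-- 'lines = []; for i, name in enumerate(ranked): lines.append(…)'
def pvLinesB (ps : List (String × Int)) : List String → Int → List String
  | [], _ => []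
  | name :: rest, i => pvLineB ps i name :: pvLinesB ps rest (i + 1)

def find_leaderboard_top_alt (player_scores : List (String × Int)) (n : Int) : String :=
  String.join (pvLinesB player_scores
    (PySem.List.slice
      (PySem.List.sorted (player_scores.map Prod.fst) (fun k => pvGet player_scores k) true)
      none (some n)) 0)

-- ===== PRECONDITION & SPEC =====
def Spec_find_leaderboard_top (player_scores : List (String × Int)) (n : Int) (out : String) : Prop := out = find_leaderboard_top_alt player_scores n
instance (player_scores : List (String × Int)) (n : Int) (out : String) : Decidable (Spec_find_leaderboard_top player_scores n out) := by unfold Spec_find_leaderboard_top; infer_instance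

-- ===== CLAIM (what is proved, stated in full; the proofs are below) =====
def Claim_equal_find_leaderboard_top : Prop := ∀ (player_scores : List (String × Int)) (n : Int), Dom_find_leaderboard_top player_scores n → Spec_find_leaderboard_top player_scores n (find_leaderboard_top player_scores n)

-- ===== LEMMAS AND PROOFS =====

theorem pvInsertA_eq_insertBy (ps : List (String × Int)) (k : String) (l : List String) :
    pvInsertA ps k l
      = PySem.List.insertBy (fun a b => decide (pvGet ps b < pvGet ps a)) k l := by
  induction l with
  | nil => simp [pvInsertA, PySem.List.insertBy]
  | cons e rest ih =>
      simp only [pvInsertA, PySem.List.insertBy, ih]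
      by_cases h : pvGet ps e < pvGet ps k <;> simp [h]

theorem pvTopn_eq (ps : List (String × Int)) :
    ps.foldl (fun acc p => if acc.isEmpty then acc ++ [p.1] else pvInsertA ps p.1 acc) []
      = PySem.List.sorted (ps.map Prod.fst) (fun k => pvGet ps k) true := by
  rw [PySem.List.sorted_rev_eq_foldl_insertBy, List.foldl_map]
  have hf : (fun (acc : List String) (p : String × Int) =>
        if acc.isEmpty then acc ++ [p.1] else pvInsertA ps p.1 acc)
      = fun acc p => PySem.List.insertBy (fun a b => decide (pvGet ps b < pvGet ps a)) p.1 acc := by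
    funext acc p
    cases acc <;> simp [pvInsertA_eq_insertBy, pvInsertA, PySem.List.insertBy]
  rw [hf]

theorem pvLine_eq (ps : List (String × Int)) (i : Int) (e : String) (hi : 0 ≤ i) :
    pvLineA ps i e = pvLineB ps i e := by
  by_cases h0 : i = 0
  · subst h0
    simp only [pvLineA, pvLineB, pvMedals]
    norm_num
    rfl
  · by_cases h1 : i = 1
    · subst h1
      simp only [pvLineA, pvLineB, pvMedals]
      norm_num
      rfl
    · by_cases h2 : i = 2
      · subst h2
        simp only [pvLineA, pvLineB, pvMedals]
        norm_num
        rfl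
      · have h3 : ¬ i < 3 := by omega
        simp [pvLineA, pvLineB, h0, h1, h2, h3]

theorem pvJoin_foldl (l : List String) (a : String) :
    l.foldl (fun r s => r ++ s) a = a ++ l.foldl (fun r s => r ++ s) "" := by
  induction l generalizing a with
  | nil => simp
  | cons x xs ih => rw [List.foldl_cons, List.foldl_cons, ih (a ++ x), ih ("" ++ x)]; simp [String.append_assoc]

theorem pvJoin_cons (x : String) (xs : List String) :
    String.join (x :: xs) = x ++ String.join xs := by
  simp only [String.join, List.foldl_cons]
  rw [pvJoin_foldl]
  simp

theorem pvFmt_eq (ps : List (String × Int)) (l : List String) :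
    ∀ (i : Int) (s : String), 0 ≤ i →
      pvFmtA ps l i s = s ++ String.join (pvLinesB ps l i) := by
  induction l with
  | nil => intro i s _; simp [pvFmtA, pvLinesB, String.join]
  | cons e rest ih =>
      intro i s hi
      rw [show pvFmtA ps (e :: rest) i s = pvFmtA ps rest (i + 1) (s ++ pvLineA ps i e) from rfl,
          ih (i + 1) _ (by omega),
          show pvLinesB ps (e :: rest) i = pvLineB ps i e :: pvLinesB ps rest (i + 1) from rfl,
          pvJoin_cons, pvLine_eq ps i e hi, String.append_assoc]

-- ===== VERDICT (by name: the statement is the Claim_ definition above) =====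
theorem find_leaderboard_top_spec : Claim_equal_find_leaderboard_top := by
  intro ps n _
  unfold Spec_find_leaderboard_top find_leaderboard_top find_leaderboard_top_alt
  rw [pvTopn_eq, pvFmt_eq ps _ 0 "" le_rfl]
  simp
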